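-- pv_equiv track=rewrite | github.com/BrianMills2718/autocoder_2025.09 | autocoder_cc/blueprint_language/intermediate_system_healer.py | _have_domain_relationship
-- ===== SOURCE A (Python) =====
-- from typing import Dict, Any, List, Optional, Set, Tuple
--
-- def _have_domain_relationship(words1: Set[str], words2: Set[str]) -> bool:
--     """Check if two word sets have domain relationships"""
--
--     domain_groups = [
--         {"user", "auth", "login", "profile", "account"},
--         {"product", "catalog", "inventory", "item"},
--         {"order", "cart", "checkout", "payment"},
--         {"analytics", "report", "metric", "data"},
--         {"notification", "email", "sms", "alert"}
--     ]
--
--     for group in domain_groups: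
--         if (words1 & group) and (words2 & group):
--             return True
--
--     return False
-- ===== SOURCE B (Python) =====
-- # Inverted index: map each keyword to its group id once, then scan the words.
-- _DOMAIN_GROUPS = [
--     {"user", "auth", "login", "profile", "account"},
--     {"product", "catalog", "inventory", "item"},
--     {"order", "cart", "checkout", "payment"},
--     {"analytics", "report", "metric", "data"},
--     {"notification", "email", "sms", "alert"},
-- ]
--
-- _KEYWORD_TO_GROUP = {kw: i for i, group in enumerate(_DOMAIN_GROUPS) for kw in group}
--
--
-- def _have_domain_relationship(words1, words2):
--     """Check if two word sets have domain relationships"""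
--     ids1 = {_KEYWORD_TO_GROUP[w] for w in words1 if w in _KEYWORD_TO_GROUP}
--     ids2 = {_KEYWORD_TO_GROUP[w] for w in words2 if w in _KEYWORD_TO_GROUP}
--     return not ids1.isdisjoint(ids2)
-- ===== Notes on version B (the rewrite author's own statement) =====
-- stated objective: alternative
-- what changed: A scans the five domain groups and intersects each against both word sets; B precomputes a keyword-to-group-id inverted index once and instead iterates over the words of each set collecting group-id sets, returning whether those id sets intersect.
import Mathlib
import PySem

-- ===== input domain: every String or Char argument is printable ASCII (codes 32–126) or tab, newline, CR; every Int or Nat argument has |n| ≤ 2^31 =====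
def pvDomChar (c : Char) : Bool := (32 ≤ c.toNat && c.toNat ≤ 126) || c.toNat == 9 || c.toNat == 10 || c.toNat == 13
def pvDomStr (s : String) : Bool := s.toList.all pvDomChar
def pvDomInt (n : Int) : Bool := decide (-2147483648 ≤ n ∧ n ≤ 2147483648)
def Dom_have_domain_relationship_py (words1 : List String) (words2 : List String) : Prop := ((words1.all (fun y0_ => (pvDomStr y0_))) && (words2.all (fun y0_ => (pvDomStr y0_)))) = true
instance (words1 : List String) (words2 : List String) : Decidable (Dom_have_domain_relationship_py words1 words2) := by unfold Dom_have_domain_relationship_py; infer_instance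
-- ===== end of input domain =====

-- B replaces A's scan over the five domain groups (two set intersections per group) by a
-- precomputed keyword→group-id inverted index: one pass over each word set collecting
-- group ids, then a disjointness test. Same return value on every input (objective: alternative).

-- ===== PORT A =====
-- the five literal domain groups of A, as Python sets
def pvAGroups : List (PySem.Set String) :=
  [PySem.Set.ofList ["user", "auth", "login", "profile", "account"],
   PySem.Set.ofList ["product", "catalog", "inventory", "item"],
   PySem.Set.ofList ["order", "cart", "checkout", "payment"],
   PySem.Set.ofList ["analytics", "report", "metric", "data"],
   PySem.Set.ofList ["notification", "email", "sms", "alert"]]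

-- A's 'for group in domain_groups: if (words1 & group) and (words2 & group): return True'
def pvGroupLoop (words1 words2 : List String) : List (PySem.Set String) → Bool
  | [] => false
  | g :: rest =>
      if PySem.Set.inter words1 g ≠ [] ∧ PySem.Set.inter words2 g ≠ [] then true
      else pvGroupLoop words1 words2 rest

def have_domain_relationship_py (words1 : List String) (words2 : List String) : Bool :=
  pvGroupLoop words1 words2 pvAGroups

-- ===== PORT B =====
-- B's module-level inverted index _KEYWORD_TO_GROUP (keyword → group id)
def pvKw2Group : PySem.Dict String Int := PySem.Dict.ofList
  [("user", 0), ("auth", 0), ("login", 0), ("profile", 0), ("account", 0),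
   ("product", 1), ("catalog", 1), ("inventory", 1), ("item", 1),
   ("order", 2), ("cart", 2), ("checkout", 2), ("payment", 2),
   ("analytics", 3), ("report", 3), ("metric", 3), ("data", 3),
   ("notification", 4), ("email", 4), ("sms", 4), ("alert", 4)]

-- B's 'ids = {_KEYWORD_TO_GROUP[w] for w in words if w in _KEYWORD_TO_GROUP}'
def pvGroupIds (words : List String) : PySem.Set Int :=
  words.foldl (fun s w =>
    match pvKw2Group.get? w with
    | some i => PySem.Set.add s i
    | none => s) PySem.Set.empty

def have_domain_relationship_py_alt (words1 : List String) (words2 : List String) : Bool :=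
  !(PySem.Set.isdisjoint (pvGroupIds words1) (pvGroupIds words2))

-- ===== PRECONDITION & SPEC =====
def Spec_have_domain_relationship_py (words1 : List String) (words2 : List String) (out : Bool) : Prop := out = have_domain_relationship_py_alt words1 words2
instance (words1 : List String) (words2 : List String) (out : Bool) : Decidable (Spec_have_domain_relationship_py words1 words2 out) := by unfold Spec_have_domain_relationship_py; infer_instance

-- ===== CLAIM (what is proved, stated in full; the proofs are below) =====
def Claim_equal_have_domain_relationship_py : Prop := ∀ (words1 : List String) (words2 : List String), Dom_have_domain_relationship_py words1 words2 → Spec_have_domain_relationship_py words1 words2 (have_domain_relationship_py words1 words2)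

-- ===== LEMMAS AND PROOFS =====

-- all 21 keywords, in the dict's key order
def pvAllKw : List String :=
  ["user", "auth", "login", "profile", "account",
   "product", "catalog", "inventory", "item",
   "order", "cart", "checkout", "payment",
   "analytics", "report", "metric", "data",
   "notification", "email", "sms", "alert"]

-- the groups as plain literal lists (definitional unfolding of pvAGroups's entries)
def pvGL : Nat → List String
  | 0 => ["user", "auth", "login", "profile", "account"]
  | 1 => ["product", "catalog", "inventory", "item"]
  | 2 => ["order", "cart", "checkout", "payment"]
  | 3 => ["analytics", "report", "metric", "data"]
  | _ => ["notification", "email", "sms", "alert"]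

set_option maxHeartbeats 1000000 in
lemma pvBridge (w : String) :
    (pvKw2Group.get? w = some 0 ↔ w ∈ pvGL 0) ∧
    (pvKw2Group.get? w = some 1 ↔ w ∈ pvGL 1) ∧
    (pvKw2Group.get? w = some 2 ↔ w ∈ pvGL 2) ∧
    (pvKw2Group.get? w = some 3 ↔ w ∈ pvGL 3) ∧
    (pvKw2Group.get? w = some 4 ↔ w ∈ pvGL 4) := by
  by_cases hw : w ∈ pvAllKw
  · fin_cases hw <;> decide
  · have hk : pvKw2Group.keys = pvAllKw := by rfl
    have h0 : pvKw2Group.get? w = none := by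
      rw [PySem.Dict.get?_eq_none_iff_not_mem_keys, hk]; exact hw
    simp only [pvAllKw, List.mem_cons, not_or] at hw
    obtain ⟨h1,h2,h3,h4,h5,h6,h7,h8,h9,h10,h11,h12,h13,h14,h15,h16,h17,h18,h19,h20,h21,-⟩ := hw
    refine ⟨?_, ?_, ?_, ?_, ?_⟩ <;> rw [h0] <;>
      simp [pvGL, List.mem_cons] <;> tauto

lemma pvLkRange (w : String) (i : Int) (h : pvKw2Group.get? w = some i) :
    i = 0 ∨ i = 1 ∨ i = 2 ∨ i = 3 ∨ i = 4 := by
  have hv : i ∈ pvKw2Group.values := by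
    have hm := PySem.Dict.mem_items_of_get?_eq_some pvKw2Group h
    simpa [PySem.Dict.values] using List.mem_map_of_mem (f := Prod.snd) hm
  have hval : pvKw2Group.values =
      [0,0,0,0,0,1,1,1,1,2,2,2,2,3,3,3,3,4,4,4,4] := by rfl
  rw [hval] at hv
  simp [List.mem_cons] at hv
  tauto

lemma pvMemGroupIds (ws : List String) (i : Int) :
    i ∈ pvGroupIds ws ↔ ∃ w ∈ ws, pvKw2Group.get? w = some i := by
  have aux : ∀ (ws : List String) (s : PySem.Set Int),
      i ∈ ws.foldl (fun s w =>
        match pvKw2Group.get? w with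
        | some j => PySem.Set.add s j
        | none => s) s ↔ i ∈ s ∨ ∃ w ∈ ws, pvKw2Group.get? w = some i := by
    intro ws
    induction ws with
    | nil => intro s; simp
    | cons a tl ih =>
      intro s
      rcases h : pvKw2Group.get? a with _ | j
      · rw [List.foldl_cons]
        simp only [h, ih]
        constructor
        · rintro (hs | ⟨w, hw, hg⟩)
          · exact Or.inl hs
          · exact Or.inr ⟨w, List.mem_cons_of_mem _ hw, hg⟩
        · rintro (hs | ⟨w, hw, hg⟩)
          · exact Or.inl hs
          · rcases List.mem_cons.mp hw with rfl | hw'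
            · rw [h] at hg; exact absurd hg (by simp)
            · exact Or.inr ⟨w, hw', hg⟩
      · rw [List.foldl_cons]
        simp only [h, ih, PySem.Set.mem_add]
        constructor
        · rintro ((hs | rfl) | ⟨w, hw, hg⟩)
          · exact Or.inl hs
          · exact Or.inr ⟨a, List.mem_cons_self, h⟩
          · exact Or.inr ⟨w, List.mem_cons_of_mem _ hw, hg⟩
        · rintro (hs | ⟨w, hw, hg⟩)
          · exact Or.inl (Or.inl hs)
          · rcases List.mem_cons.mp hw with rfl | hw'
            · rw [h] at hg
              exact Or.inl (Or.inr (by simpa using hg.symm))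
            · exact Or.inr ⟨w, hw', hg⟩
  simpa using aux ws PySem.Set.empty

-- nonempty intersection = a shared element
lemma pvInterNe (ws g : List String) :
    PySem.Set.inter ws g ≠ [] ↔ ∃ w ∈ ws, w ∈ g := by
  rw [← List.isEmpty_eq_false_iff, List.isEmpty_eq_false_iff_exists_mem]
  constructor
  · rintro ⟨x, hx⟩
    exact ⟨x, ((PySem.Set.mem_inter ws g x).mp hx).1, ((PySem.Set.mem_inter ws g x).mp hx).2⟩
  · rintro ⟨w, h1, h2⟩
    exact ⟨w, (PySem.Set.mem_inter ws g w).mpr ⟨h1, h2⟩⟩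

-- A's loop over a group list, characterised
lemma pvGroupLoop_iff (w1 w2 : List String) (gs : List (PySem.Set String)) :
    pvGroupLoop w1 w2 gs = true ↔
      ∃ g ∈ gs, PySem.Set.inter w1 g ≠ [] ∧ PySem.Set.inter w2 g ≠ [] := by
  induction gs with
  | nil => simp [pvGroupLoop]
  | cons g rest ih =>
    rw [pvGroupLoop]
    split_ifs with hc
    · simp only [true_iff]
      exact ⟨g, List.mem_cons_self, hc⟩
    · rw [ih]
      constructor
      · rintro ⟨g', hg', hcc⟩
        exact ⟨g', List.mem_cons_of_mem _ hg', hcc⟩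
      · rintro ⟨g', hg', hcc⟩
        rcases List.mem_cons.mp hg' with rfl | hg''
        · exact absurd hcc hc
        · exact ⟨g', hg'', hcc⟩

lemma pvBridgeN (w : String) (k : Nat) (hk : k < 5) :
    pvKw2Group.get? w = some (k : Int) ↔ w ∈ pvGL k := by
  interval_cases k
  · exact (pvBridge w).1
  · exact (pvBridge w).2.1
  · exact (pvBridge w).2.2.1
  · exact (pvBridge w).2.2.2.1
  · exact (pvBridge w).2.2.2.2

-- both programs are true exactly on a shared group id
lemma pvA_iff (w1 w2 : List String) :
    have_domain_relationship_py w1 w2 = true ↔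
      ∃ k : Nat, k < 5 ∧ (∃ w ∈ w1, w ∈ pvGL k) ∧ (∃ w ∈ w2, w ∈ pvGL k) := by
  unfold have_domain_relationship_py
  rw [pvGroupLoop_iff]
  have hgs : pvAGroups = [PySem.Set.ofList (pvGL 0), PySem.Set.ofList (pvGL 1),
      PySem.Set.ofList (pvGL 2), PySem.Set.ofList (pvGL 3), PySem.Set.ofList (pvGL 4)] := by rfl
  rw [hgs]
  simp only [List.mem_cons, List.not_mem_nil, or_false]
  constructor
  · rintro ⟨g, hg, hc1, hc2⟩
    have : ∃ k : Nat, k < 5 ∧ g = PySem.Set.ofList (pvGL k) := by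
      rcases hg with rfl | rfl | rfl | rfl | rfl
      exacts [⟨0, by omega, rfl⟩, ⟨1, by omega, rfl⟩, ⟨2, by omega, rfl⟩,
              ⟨3, by omega, rfl⟩, ⟨4, by omega, rfl⟩]
    obtain ⟨k, hk, rfl⟩ := this
    refine ⟨k, hk, ?_, ?_⟩
    · obtain ⟨w, hw, hwg⟩ := (pvInterNe _ _).mp hc1
      exact ⟨w, hw, (PySem.Set.mem_ofList _ _).mp hwg⟩
    · obtain ⟨w, hw, hwg⟩ := (pvInterNe _ _).mp hc2
      exact ⟨w, hw, (PySem.Set.mem_ofList _ _).mp hwg⟩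
  · rintro ⟨k, hk, ⟨a, ha, hag⟩, ⟨b, hb, hbg⟩⟩
    refine ⟨PySem.Set.ofList (pvGL k), ?_, ?_, ?_⟩
    · interval_cases k <;> simp
    · exact (pvInterNe _ _).mpr ⟨a, ha, (PySem.Set.mem_ofList _ _).mpr hag⟩
    · exact (pvInterNe _ _).mpr ⟨b, hb, (PySem.Set.mem_ofList _ _).mpr hbg⟩

lemma pvB_iff (w1 w2 : List String) :
    have_domain_relationship_py_alt w1 w2 = true ↔
      ∃ k : Nat, k < 5 ∧ (∃ w ∈ w1, w ∈ pvGL k) ∧ (∃ w ∈ w2, w ∈ pvGL k) := by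
  unfold have_domain_relationship_py_alt
  rw [Bool.not_eq_eq_eq_not]
  simp only [Bool.not_true]
  rw [← Bool.not_eq_true, PySem.Set.isdisjoint_iff]
  push Not
  constructor
  · rintro ⟨i, hi1, hi2⟩
    obtain ⟨a, ha, hla⟩ := (pvMemGroupIds w1 i).mp hi1
    obtain ⟨b, hb, hlb⟩ := (pvMemGroupIds w2 i).mp hi2
    have h5 := pvLkRange a i hla
    have hknat : ∃ k : Nat, k < 5 ∧ i = (k : Int) := by
      rcases h5 with rfl | rfl | rfl | rfl | rfl
      exacts [⟨0, by omega, rfl⟩, ⟨1, by omega, rfl⟩, ⟨2, by omega, rfl⟩,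
              ⟨3, by omega, rfl⟩, ⟨4, by omega, rfl⟩]
    obtain ⟨k, hk, rfl⟩ := hknat
    exact ⟨k, hk, ⟨a, ha, (pvBridgeN a k hk).mp hla⟩, ⟨b, hb, (pvBridgeN b k hk).mp hlb⟩⟩
  · rintro ⟨k, hk, ⟨a, ha, hag⟩, ⟨b, hb, hbg⟩⟩
    refine ⟨(k : Int), ?_, ?_⟩
    · exact (pvMemGroupIds w1 _).mpr ⟨a, ha, (pvBridgeN a k hk).mpr hag⟩
    · exact (pvMemGroupIds w2 _).mpr ⟨b, hb, (pvBridgeN b k hk).mpr hbg⟩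

-- ===== VERDICT (by name: the statement is the Claim_ definition above) =====
theorem have_domain_relationship_py_spec : Claim_equal_have_domain_relationship_py := by
  intro w1 w2 _
  unfold Spec_have_domain_relationship_py
  have h := (pvA_iff w1 w2).trans (pvB_iff w1 w2).symm
  cases hA : have_domain_relationship_py w1 w2 <;>
  cases hB : have_domain_relationship_py_alt w1 w2 <;> simp_all
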